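-- pv_equiv track=rewrite | github.com/DongYun666/leetcode | 塞克竞赛/Seq.py | hitting
-- ===== SOURCE A (Python) =====
-- def hitting(ans,array,command):
--     Command = command.copy()
--     if command ==[]:
--         if array not in ans:
--             ans.append(array)
--         return ans
--     command_i = Command[0]
--     l,r = int(command_i[0]-1),int(command_i[1]-1)
--     del Command[0]
--     array1,array0 = array.copy(),array.copy()
--     for i in range(l,r+1):
--         array1[i] = 1
--         array0[i] = 0
--     hitting(ans,array1,Command)
--     hitting(ans,array0,Command)
--     return ans
-- ===== SOURCE B (Python) =====
-- def hitting(ans, array, command):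
--     # Breadth-wise enumeration: build all 2^m outcome arrays level by level
--     # (1-branch before 0-branch, matching DFS preorder), then one dedup pass.
--     outcomes = [array]
--     for cmd in command:
--         l, r = int(cmd[0] - 1), int(cmd[1] - 1)
--         nxt = []
--         for a in outcomes:
--             one, zero = a.copy(), a.copy()
--             for i in range(l, r + 1):
--                 one[i] = 1
--                 zero[i] = 0
--             nxt.append(one)
--             nxt.append(zero)
--         outcomes = nxt
--     for o in outcomes:
--         if o not in ans:
--             ans.append(o)
--     return ans
-- ===== Notes on version B (the rewrite author's own statement) =====
-- stated objective: alternative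
-- what changed: Replaces A's depth-first recursion with dedup interleaved at the leaves by a flat level-by-level product loop that builds all 2^m outcome arrays in the same preorder and then deduplicates them in a single first-seen pass.
import Mathlib
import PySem

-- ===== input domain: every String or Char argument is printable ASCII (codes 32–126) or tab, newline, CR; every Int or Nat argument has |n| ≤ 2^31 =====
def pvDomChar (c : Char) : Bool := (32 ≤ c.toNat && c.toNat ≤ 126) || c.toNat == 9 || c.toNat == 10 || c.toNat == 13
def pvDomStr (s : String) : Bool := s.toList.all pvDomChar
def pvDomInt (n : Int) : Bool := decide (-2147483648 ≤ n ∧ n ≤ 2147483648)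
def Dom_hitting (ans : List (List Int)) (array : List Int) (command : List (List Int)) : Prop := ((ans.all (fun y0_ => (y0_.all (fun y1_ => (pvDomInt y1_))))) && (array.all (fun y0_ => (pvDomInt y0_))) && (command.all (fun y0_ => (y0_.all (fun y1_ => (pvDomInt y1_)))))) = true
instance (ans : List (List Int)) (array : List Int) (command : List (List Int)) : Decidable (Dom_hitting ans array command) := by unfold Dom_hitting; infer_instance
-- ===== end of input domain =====

-- B replaces A's dedup-interleaved DFS recursion by a level-by-level (product-style)
-- enumeration of all outcome arrays followed by a single dedup pass (objective: alternative).
-- A mutates `ans` in place (appends); the equivalence proved here is about the RETURN value.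

-- ===== PORT A =====
-- the fill loop 'for i in range(l, r+1): array1[i] = 1; array0[i] = 0' (shared verbatim by A and B)
def pvFillPair (a : List Int) (l r : Int) : List Int × List Int :=
  (PySem.List.pyRange l (r + 1) 1).foldl
    (fun pr i => (PySem.List.pySetD pr.1 i 1, PySem.List.pySetD pr.2 i 0)) (a, a)

def hitting (ans : List (List Int)) (array : List Int) (command : List (List Int)) : List (List Int) :=
  match command with
  | [] => if array ∈ ans then ans else ans ++ [array]
  | command_i :: Command =>
    let l := PySem.List.pyGetD command_i 0 0 - 1
    let r := PySem.List.pyGetD command_i 1 0 - 1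
    let p := pvFillPair array l r
    hitting (hitting ans p.1 Command) p.2 Command

-- ===== PORT B =====
def hitting_alt (ans : List (List Int)) (array : List Int) (command : List (List Int)) : List (List Int) :=
  let outcomes := command.foldl
    (fun os cmd =>
      let l := PySem.List.pyGetD cmd 0 0 - 1
      let r := PySem.List.pyGetD cmd 1 0 - 1
      os.foldl (fun nxt a =>
        let p := pvFillPair a l r
        nxt ++ [p.1, p.2]) [])
    [array]
  outcomes.foldl (fun res o => if o ∈ res then res else res ++ [o]) ans

-- ===== PRECONDITION & SPEC =====
-- Pre_ excludes exactly the inputs on which Python A raises IndexError: a command shorter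
-- than 2 entries, or a non-empty fill range reaching an index outside [-len(array), len(array)).
def Pre_hitting (ans : List (List Int)) (array : List Int) (command : List (List Int)) : Prop :=
  ∀ c ∈ command, 2 ≤ c.length ∧
    (PySem.List.pyGetD c 0 0 - 1 ≤ PySem.List.pyGetD c 1 0 - 1 →
      -(array.length : Int) ≤ PySem.List.pyGetD c 0 0 - 1 ∧
        PySem.List.pyGetD c 1 0 - 1 < (array.length : Int))
instance (ans : List (List Int)) (array : List Int) (command : List (List Int)) : Decidable (Pre_hitting ans array command) := by unfold Pre_hitting; infer_instance

def pvWitness_hitting : List (List Int) × List Int × List (List Int) := ([], [0, 0, 0], [[1, 2], [2, 3]])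

def Spec_hitting (ans : List (List Int)) (array : List Int) (command : List (List Int)) (out : List (List Int)) : Prop := out = hitting_alt ans array command
instance (ans : List (List Int)) (array : List Int) (command : List (List Int)) (out : List (List Int)) : Decidable (Spec_hitting ans array command out) := by unfold Spec_hitting; infer_instance

-- ===== CLAIM (what is proved, stated in full; the proofs are below) =====
def Claim_equal_hitting : Prop := ∀ (ans : List (List Int)) (array : List Int) (command : List (List Int)), Dom_hitting ans array command → Pre_hitting ans array command → Spec_hitting ans array command (hitting ans array command)

-- ===== LEMMAS AND PROOFS =====

-- the leaves of A's recursion tree, in DFS preorder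
def pvLeaves (array : List Int) : List (List Int) → List (List Int)
  | [] => [array]
  | c :: cs =>
    let p := pvFillPair array (PySem.List.pyGetD c 0 0 - 1) (PySem.List.pyGetD c 1 0 - 1)
    pvLeaves p.1 cs ++ pvLeaves p.2 cs

-- A = dedup-fold its leaves in DFS order onto ans
theorem pv_hitting_eq_foldl_leaves (command : List (List Int)) :
    ∀ (ans : List (List Int)) (array : List Int),
      hitting ans array command
        = (pvLeaves array command).foldl (fun res o => if o ∈ res then res else res ++ [o]) ans := by
  induction command with
  | nil => intro ans array; simp [hitting, pvLeaves]
  | cons c cs ih =>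
      intro ans array
      simp only [hitting, pvLeaves, List.foldl_append]
      rw [ih, ih]

-- B's outer fold computes the leaves of every seed, concatenated
theorem pv_foldl_levels_eq_flatMap (command : List (List Int)) :
    ∀ (os : List (List Int)),
      command.foldl
        (fun os cmd =>
          let l := PySem.List.pyGetD cmd 0 0 - 1
          let r := PySem.List.pyGetD cmd 1 0 - 1
          os.foldl (fun nxt a =>
            let p := pvFillPair a l r
            nxt ++ [p.1, p.2]) []) os
        = os.flatMap (fun a => pvLeaves a command) := by
  induction command with
  | nil => intro os; simp [pvLeaves]
  | cons c cs ih =>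
      intro os
      simp only [List.foldl_cons]
      rw [ih]
      rw [PySem.List.foldl_append_eq_flatMap
        (g := fun a => [(pvFillPair a (PySem.List.pyGetD c 0 0 - 1) (PySem.List.pyGetD c 1 0 - 1)).1,
                        (pvFillPair a (PySem.List.pyGetD c 0 0 - 1) (PySem.List.pyGetD c 1 0 - 1)).2])]
      simp [List.flatMap_assoc, pvLeaves]

-- ===== VERDICT (by name: the statement is the Claim_ definition above) =====
theorem hitting_spec : Claim_equal_hitting := by
  intro ans array command _ _
  unfold Spec_hitting hitting_alt
  rw [pv_foldl_levels_eq_flatMap, pv_hitting_eq_foldl_leaves]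
  simp
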